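-- pv_equiv track=rewrite | github.com/dayglo/rightplace | server/app/services/treemap_service.py | aggregate_status_upward
-- ===== SOURCE A (Python) =====
-- from typing import Dict, List, Optional, Set
--
-- def aggregate_status_upward(
--     children_statuses: List[str]
-- ) -> str:
--     """
--     Aggregate status from children to parent.
--
--     Rules:
--     - If any child is RED → parent is RED
--     - If all children are GREEN → parent is GREEN
--     - If any child is AMBER and no RED → parent is AMBER
--     - If all children are GREY → parent is GREY
--
--     Args:
--         children_statuses: List of child status strings
--
--     Returns:
--         Aggregated status string
--     """
--     if not children_statuses:
--         return "grey"
--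
--     if "red" in children_statuses:
--         return "red"
--
--     if all(s == "green" for s in children_statuses):
--         return "green"
--
--     if "amber" in children_statuses:
--         return "amber"
--
--     return "grey"
-- ===== SOURCE B (Python) =====
-- def aggregate_status_upward(children_statuses):
--     if not children_statuses:
--         return "grey"
--     has_red = False
--     all_green = True
--     has_amber = False
--     for s in children_statuses:
--         if s == "red":
--             has_red = True
--         if s != "green":
--             all_green = False
--         if s == "amber":
--             has_amber = True
--     if has_red:
--         return "red"
--     if all_green:
--         return "green"
--     if has_amber:
--         return "amber"
--     return "grey"
-- ===== Notes on version B (the rewrite author's own statement) =====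
-- stated objective: simpler
-- what changed: Replaces A's three separate scans (membership 'red', all-green, membership 'amber') with a single pass maintaining three flags, followed by the same decision cascade.
import Mathlib
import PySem

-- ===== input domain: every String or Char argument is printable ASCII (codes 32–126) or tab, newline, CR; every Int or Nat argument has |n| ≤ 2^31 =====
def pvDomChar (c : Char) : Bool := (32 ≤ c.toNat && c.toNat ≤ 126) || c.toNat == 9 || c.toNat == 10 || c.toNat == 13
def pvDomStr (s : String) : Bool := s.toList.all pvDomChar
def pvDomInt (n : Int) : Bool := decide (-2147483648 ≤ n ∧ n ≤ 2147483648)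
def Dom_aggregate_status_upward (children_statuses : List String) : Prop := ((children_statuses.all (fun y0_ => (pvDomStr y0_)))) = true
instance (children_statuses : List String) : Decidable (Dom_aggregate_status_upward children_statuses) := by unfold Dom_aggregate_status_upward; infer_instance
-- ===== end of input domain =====

-- B replaces A's three separate scans with one pass maintaining three flags (objective: simpler).


-- ===== PORT A =====
-- literal port of A: empty guard, then membership / all / membership scans
def aggregate_status_upward (children_statuses : List String) : String :=
  if children_statuses = [] then "grey"
  else if children_statuses.contains "red" then "red"
  else if children_statuses.all (fun s => s == "green") then "green"
  else if children_statuses.contains "amber" then "amber"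
  else "grey"

-- ===== PORT B =====
-- port of B: one pass maintaining (has_red, all_green, has_amber), then the decision cascade
def aggregate_status_upward_alt (children_statuses : List String) : String :=
  if children_statuses = [] then "grey"
  else
    let flags := children_statuses.foldl
      (fun (acc : Bool × Bool × Bool) s =>
        ((if s == "red" then true else acc.1),
         (if s != "green" then false else acc.2.1),
         (if s == "amber" then true else acc.2.2)))
      (false, true, false)
    if flags.1 then "red"
    else if flags.2.1 then "green"
    else if flags.2.2 then "amber"
    else "grey"

-- ===== PRECONDITION & SPEC =====
def Spec_aggregate_status_upward (children_statuses : List String) (out : String) : Prop := out = aggregate_status_upward_alt children_statuses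
instance (children_statuses : List String) (out : String) : Decidable (Spec_aggregate_status_upward children_statuses out) := by unfold Spec_aggregate_status_upward; infer_instance

-- ===== CLAIM (what is proved, stated in full; the proofs are below) =====
def Claim_equal_aggregate_status_upward : Prop := ∀ (children_statuses : List String), Dom_aggregate_status_upward children_statuses → Spec_aggregate_status_upward children_statuses (aggregate_status_upward children_statuses)

-- ===== LEMMAS AND PROOFS =====
-- the fold's three flags equal A's three scans
theorem flags_eq (l : List String) (a b c : Bool) :
    l.foldl (fun (acc : Bool × Bool × Bool) s =>
        ((if s == "red" then true else acc.1),
         (if s != "green" then false else acc.2.1),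
         (if s == "amber" then true else acc.2.2))) (a, b, c)
    = (a || l.contains "red", b && l.all (fun s => s == "green"), c || l.contains "amber") := by
  induction l generalizing a b c with
  | nil => simp
  | cons h t ih =>
    simp only [List.foldl_cons, ih, List.contains_cons, List.all_cons]
    by_cases hr : h = "red" <;> by_cases hg : h = "green" <;> by_cases ha : h = "amber" <;>
      simp_all [Bool.or_comm, Bool.and_comm]
    have h1 : (("red" : String) == h) = false := by simp [Ne.symm hr]
    have h2 : (("amber" : String) == h) = false := by simp [Ne.symm ha]
    simp [h1, h2]

-- ===== VERDICT (by name: the statement is the Claim_ definition above) =====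
theorem aggregate_status_upward_spec : Claim_equal_aggregate_status_upward := by
  intro l _
  unfold Spec_aggregate_status_upward aggregate_status_upward aggregate_status_upward_alt
  by_cases hnil : l = []
  · simp [hnil]
  · simp only [hnil, if_false, flags_eq]
    by_cases h1 : l.contains "red" <;> by_cases h2 : l.all (fun s => s == "green") <;>
      by_cases h3 : l.contains "amber" <;> simp [h2]
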